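-- pv_equiv track=rewrite | github.com/narutozb/StudyZALE | python/utilities/custom_list_tools.py | sort_list_by_count_keyword
-- ===== SOURCE A (Python) =====
-- def sort_list_by_count_keyword(keyword=None, input_list=[]):
--     '''
--
--     :param keyword: 需要计数的关键字
--     :param input_list: 输入列表
--     :return: 列表
--     '''
--     if not keyword:
--         input_list
--     i = 1
--     while i<len(input_list):
--         j=0
--         while j< len(input_list) - 1:
--             if input_list[j].count(keyword) > input_list[j + 1].count(keyword):
--                 input_list[j], input_list[j + 1] = input_list[j + 1], input_list[j]
--             j += 1
--         i += 1
--     return input_list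
-- ===== SOURCE B (Python) =====
-- def sort_list_by_count_keyword(keyword=None, input_list=[]):
--     input_list[:] = sorted(input_list, key=lambda s: s.count(keyword))
--     return input_list
-- ===== Notes on version B (the rewrite author's own statement) =====
-- stated objective: faster
-- what changed: Replaces A's hand-written (n-1)-pass adjacent-swap bubble sort with a single stable sorted() call keyed by s.count(keyword), written back in place with slice assignment; A's stable strict-> swaps make the two results identical on every input.
import Mathlib
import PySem

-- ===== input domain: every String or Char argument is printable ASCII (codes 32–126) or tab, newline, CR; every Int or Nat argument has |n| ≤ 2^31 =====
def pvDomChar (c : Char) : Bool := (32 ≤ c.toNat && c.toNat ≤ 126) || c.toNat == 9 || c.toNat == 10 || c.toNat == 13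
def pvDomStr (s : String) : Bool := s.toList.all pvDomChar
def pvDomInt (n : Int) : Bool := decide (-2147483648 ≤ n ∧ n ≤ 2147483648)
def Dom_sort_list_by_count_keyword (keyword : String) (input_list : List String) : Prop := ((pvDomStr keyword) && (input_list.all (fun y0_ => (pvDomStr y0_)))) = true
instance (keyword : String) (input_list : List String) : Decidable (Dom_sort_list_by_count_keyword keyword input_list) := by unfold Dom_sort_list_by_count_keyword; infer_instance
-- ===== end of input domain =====

-- B replaces A's (n-1)-pass adjacent-swap bubble sort with one stable sorted() call keyed by
-- s.count(keyword) (objective: faster). Both Pythons mutate input_list in place and return it;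
-- the equivalence proved here is about the returned value.

-- ===== PORT A =====
-- Inner 'while j < len(input_list) - 1' loop: one left-to-right pass of in-place adjacent
-- compare-and-swap on counts. Ported by hand as structural recursion carrying the element at
-- position j; exact: each Python swap touches only positions j and j+1.
def pvPass (keyword : String) : List String → List String
  | [] => []
  | [a] => [a]
  | a :: b :: t =>
      if PySem.Str.count a keyword > PySem.Str.count b keyword
        then b :: pvPass keyword (a :: t)
        else a :: pvPass keyword (b :: t)
termination_by xs => xs.length

-- Outer 'i = 1; while i < len(input_list)' loop: runs the pass len(input_list) - 1 times
-- (the length never changes); ported as recursion on the remaining iteration count.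
def pvOuter (keyword : String) : Nat → List String → List String
  | 0, xs => xs
  | k + 1, xs => pvOuter keyword k (pvPass keyword xs)

-- 'if not keyword: input_list' in A is a no-op (an expression statement) and ports to nothing.
def sort_list_by_count_keyword (keyword : String) (input_list : List String) : List String :=
  pvOuter keyword (input_list.length - 1) input_list

-- ===== PORT B =====
def sort_list_by_count_keyword_alt (keyword : String) (input_list : List String) : List String :=
  PySem.List.sorted input_list (fun s => PySem.Str.count s keyword) false

-- ===== PRECONDITION & SPEC =====
def Spec_sort_list_by_count_keyword (keyword : String) (input_list : List String) (out : List String) : Prop := out = sort_list_by_count_keyword_alt keyword input_list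
instance (keyword : String) (input_list : List String) (out : List String) : Decidable (Spec_sort_list_by_count_keyword keyword input_list out) := by unfold Spec_sort_list_by_count_keyword; infer_instance

-- ===== CLAIM (what is proved, stated in full; the proofs are below) =====
def Claim_equal_sort_list_by_count_keyword : Prop := ∀ (keyword : String) (input_list : List String), Dom_sort_list_by_count_keyword keyword input_list → Spec_sort_list_by_count_keyword keyword input_list (sort_list_by_count_keyword keyword input_list)

-- ===== LEMMAS AND PROOFS =====

theorem pv_ins_cons_pos {bef : String → String → Bool} {x y : String} (ys : List String)
    (h : bef x y = true) :
    PySem.List.insertBy bef x (y :: ys) = x :: y :: ys := by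
  simp [PySem.List.insertBy, h]

theorem pv_ins_cons_neg {bef : String → String → Bool} {x y : String} (ys : List String)
    (h : bef x y = false) :
    PySem.List.insertBy bef x (y :: ys) = y :: PySem.List.insertBy bef x ys := by
  simp [PySem.List.insertBy, h]

-- Inserting two elements with distinct keys into a stable insertion-sort accumulator commutes.
theorem pv_insertBy_comm (key : String → Nat) (a b : String) (h : key b < key a) :
    ∀ acc : List String,
      PySem.List.insertBy (fun x y => decide (key x < key y)) a
        (PySem.List.insertBy (fun x y => decide (key x < key y)) b acc) =
      PySem.List.insertBy (fun x y => decide (key x < key y)) b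
        (PySem.List.insertBy (fun x y => decide (key x < key y)) a acc) := by
  have hba : decide (key b < key a) = true := decide_eq_true h
  have hab : decide (key a < key b) = false := decide_eq_false (Nat.not_lt.mpr (Nat.le_of_lt h))
  intro acc
  induction acc with
  | nil =>
      show PySem.List.insertBy _ a [b] = PySem.List.insertBy _ b [a]
      rw [pv_ins_cons_neg [] hab, pv_ins_cons_pos [] hba]
      rfl
  | cons c cs ih =>
      by_cases hac : key a < key c
      · have hbc : key b < key c := Nat.lt_trans h hac
        rw [pv_ins_cons_pos cs (decide_eq_true hbc),
            pv_ins_cons_neg (c :: cs) hab,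
            pv_ins_cons_pos cs (decide_eq_true hac),
            pv_ins_cons_pos (c :: cs) hba]
      · by_cases hbc : key b < key c
        · rw [pv_ins_cons_pos cs (decide_eq_true hbc),
              pv_ins_cons_neg (c :: cs) hab,
              pv_ins_cons_neg cs (decide_eq_false hac),
              pv_ins_cons_pos (PySem.List.insertBy _ a cs) (decide_eq_true hbc)]
        · rw [pv_ins_cons_neg cs (decide_eq_false hbc),
              pv_ins_cons_neg _ (decide_eq_false hac),
              pv_ins_cons_neg cs (decide_eq_false hac),
              pv_ins_cons_neg _ (decide_eq_false hbc), ih]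

-- One bubble pass does not change the stable-insertion fold (it only swaps strictly
-- out-of-order pairs, whose insertions commute).
theorem pv_foldl_pass (keyword : String) :
    ∀ (n : Nat) (xs : List String), xs.length ≤ n → ∀ acc : List String,
      (pvPass keyword xs).foldl
        (fun acc x => PySem.List.insertBy
          (fun a b => decide (PySem.Str.count a keyword < PySem.Str.count b keyword)) x acc) acc =
      xs.foldl
        (fun acc x => PySem.List.insertBy
          (fun a b => decide (PySem.Str.count a keyword < PySem.Str.count b keyword)) x acc) acc := by
  intro n
  induction n with
  | zero =>
      intro xs hxs acc
      have : xs = [] := List.length_eq_zero_iff.mp (Nat.le_zero.mp hxs)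
      subst this
      simp [pvPass]
  | succ n ih =>
      intro xs hxs acc
      match xs with
      | [] => simp [pvPass]
      | [a] => simp [pvPass]
      | a :: b :: t =>
          by_cases hab : PySem.Str.count a keyword > PySem.Str.count b keyword
          · rw [pvPass, if_pos hab]
            simp only [List.foldl_cons]
            rw [ih (a :: t) (by simpa using Nat.le_of_succ_le_succ hxs)]
            simp only [List.foldl_cons]
            rw [pv_insertBy_comm (fun s => PySem.Str.count s keyword) a b hab]
          · rw [pvPass, if_neg hab]
            simp only [List.foldl_cons]
            rw [ih (b :: t) (by simpa using Nat.le_of_succ_le_succ hxs)]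
            simp only [List.foldl_cons]

theorem pv_sorted_pass (keyword : String) (xs : List String) :
    PySem.List.sorted (pvPass keyword xs) (fun s => PySem.Str.count s keyword) false =
    PySem.List.sorted xs (fun s => PySem.Str.count s keyword) false := by
  rw [PySem.List.sorted_eq_foldl_insertBy, PySem.List.sorted_eq_foldl_insertBy]
  exact pv_foldl_pass keyword xs.length xs (Nat.le_refl _) []

theorem pv_sorted_outer (keyword : String) :
    ∀ (k : Nat) (xs : List String),
      PySem.List.sorted (pvOuter keyword k xs) (fun s => PySem.Str.count s keyword) false =
      PySem.List.sorted xs (fun s => PySem.Str.count s keyword) false := by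
  intro k
  induction k with
  | zero => intro xs; rfl
  | succ k ih => intro xs; rw [pvOuter, ih, pv_sorted_pass]

-- A pass on an already key-sorted list is the identity.
theorem pv_pass_sorted (keyword : String) :
    ∀ s : List String,
      s.Pairwise (fun a b => PySem.Str.count a keyword ≤ PySem.Str.count b keyword) →
      pvPass keyword s = s := by
  intro s
  induction s with
  | nil => intro _; simp [pvPass]
  | cons a t ih =>
      intro hp
      match t, hp with
      | [], _ => simp [pvPass]
      | b :: t', hp =>
          have hab : PySem.Str.count a keyword ≤ PySem.Str.count b keyword :=
            (List.pairwise_cons.mp hp).1 b (by simp)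
          rw [pvPass, if_neg (Nat.not_lt.mpr hab)]
          rw [ih (List.pairwise_cons.mp hp).2]

-- One pass on f ++ s, where s is a settled suffix (sorted and ≥ everything in f): it only
-- rearranges f, leaves s alone, and pushes a maximum of f to the end of the f-part.
theorem pv_pass_settled (keyword : String) :
    ∀ (n : Nat) (f : List String), f.length ≤ n → ∀ s : List String,
      s.Pairwise (fun a b => PySem.Str.count a keyword ≤ PySem.Str.count b keyword) →
      (∀ a ∈ f, ∀ b ∈ s, PySem.Str.count a keyword ≤ PySem.Str.count b keyword) →
      ∃ f', pvPass keyword (f ++ s) = f' ++ s ∧ f'.Perm f ∧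
        (f = [] ∨ ∃ g m, f' = g ++ [m] ∧
          (∀ a ∈ g, PySem.Str.count a keyword ≤ PySem.Str.count m keyword)) := by
  intro n
  induction n with
  | zero =>
      intro f hf s hs _hfs
      have : f = [] := List.length_eq_zero_iff.mp (Nat.le_zero.mp hf)
      subst this
      exact ⟨[], by simpa using pv_pass_sorted keyword s hs, List.Perm.refl _, Or.inl rfl⟩
  | succ n ih =>
      intro f hf s hs hfs
      match f with
      | [] =>
          exact ⟨[], by simpa using pv_pass_sorted keyword s hs, List.Perm.refl _, Or.inl rfl⟩
      | [a] =>
          refine ⟨[a], ?_, List.Perm.refl _, Or.inr ⟨[], a, rfl, by simp⟩⟩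
          match s with
          | [] => simp [pvPass]
          | b :: t =>
              have hab : PySem.Str.count a keyword ≤ PySem.Str.count b keyword :=
                hfs a (by simp) b (by simp)
              show pvPass keyword (a :: b :: t) = _
              rw [pvPass, if_neg (Nat.not_lt.mpr hab), pv_pass_sorted keyword (b :: t) hs]
              rfl
      | a :: b :: f2 =>
          by_cases hab : PySem.Str.count a keyword > PySem.Str.count b keyword
          · obtain ⟨f1', heq, hperm, hlast⟩ := ih (a :: f2)
              (by simpa using Nat.le_of_succ_le_succ hf) s hs
              (fun x hx => hfs x (by rcases List.mem_cons.mp hx with h | h <;> simp [h]))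
            rcases hlast with h | ⟨g, m, rfl, hg⟩
            · exact absurd h (by simp)
            have ham : PySem.Str.count a keyword ≤ PySem.Str.count m keyword := by
              have hmem : a ∈ g ++ [m] := hperm.mem_iff.mpr (by simp)
              rcases List.mem_append.mp hmem with h | h
              · exact hg a h
              · simp at h; subst h; exact Nat.le_refl _
            refine ⟨b :: (g ++ [m]), ?_, ?_, Or.inr ⟨b :: g, m, rfl, ?_⟩⟩
            · show pvPass keyword (a :: b :: (f2 ++ s)) = _
              rw [pvPass, if_pos hab]
              simpa using heq
            · exact (hperm.cons b).trans (List.Perm.swap a b f2)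
            · intro x hx
              rcases List.mem_cons.mp hx with rfl | h
              · exact Nat.le_trans (Nat.le_of_lt hab) ham
              · exact hg x h
          · obtain ⟨f1', heq, hperm, hlast⟩ := ih (b :: f2)
              (by simpa using Nat.le_of_succ_le_succ hf) s hs
              (fun x hx => hfs x (by rcases List.mem_cons.mp hx with h | h <;> simp [h]))
            rcases hlast with h | ⟨g, m, rfl, hg⟩
            · exact absurd h (by simp)
            have hbm : PySem.Str.count b keyword ≤ PySem.Str.count m keyword := by
              have hmem : b ∈ g ++ [m] := hperm.mem_iff.mpr (by simp)
              rcases List.mem_append.mp hmem with h | h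
              · exact hg b h
              · simp at h; subst h; exact Nat.le_refl _
            refine ⟨a :: (g ++ [m]), ?_, ?_, Or.inr ⟨a :: g, m, rfl, ?_⟩⟩
            · show pvPass keyword (a :: b :: (f2 ++ s)) = _
              rw [pvPass, if_neg hab]
              simpa using heq
            · exact hperm.cons a
            · intro x hx
              rcases List.mem_cons.mp hx with rfl | h
              · exact Nat.le_trans (Nat.not_lt.mp hab) hbm
              · exact hg x h

-- k passes fully sort f ++ s once the settled suffix s backs a front of length ≤ k + 1.
theorem pv_outer_sorts (keyword : String) :
    ∀ (k : Nat) (f s : List String), f.length ≤ k + 1 →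
      s.Pairwise (fun a b => PySem.Str.count a keyword ≤ PySem.Str.count b keyword) →
      (∀ a ∈ f, ∀ b ∈ s, PySem.Str.count a keyword ≤ PySem.Str.count b keyword) →
      (pvOuter keyword k (f ++ s)).Pairwise
        (fun a b => PySem.Str.count a keyword ≤ PySem.Str.count b keyword) := by
  intro k
  induction k with
  | zero =>
      intro f s hf hs hfs
      match f, hf with
      | [], _ => simpa using hs
      | [a], _ =>
          show List.Pairwise _ (a :: s)
          exact List.pairwise_cons.mpr ⟨fun b hb => hfs a (by simp) b hb, hs⟩
  | succ k ih =>
      intro f s hf hs hfs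
      show (pvOuter keyword k (pvPass keyword (f ++ s))).Pairwise _
      obtain ⟨f', heq, hperm, hlast⟩ :=
        pv_pass_settled keyword f.length f (Nat.le_refl _) s hs hfs
      rcases hlast with rfl | ⟨g, m, rfl, hg⟩
      · have : f' = [] := hperm.eq_nil
        subst this
        rw [heq]
        exact ih [] s (by simp) hs (by simp)
      · rw [heq]
        have hmem : ∀ x ∈ g ++ [m], x ∈ f := fun x hx => hperm.mem_iff.mp hx
        have hlen : g.length + 1 = f.length := by
          have := hperm.length_eq; simpa using this
        have hgoal : (g ++ [m]) ++ s = g ++ (m :: s) := by simp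
        rw [hgoal]
        apply ih g (m :: s) (by omega)
        · exact List.pairwise_cons.mpr
            ⟨fun b hb => hfs m (hmem m (by simp)) b hb, hs⟩
        · intro a ha b hb
          rcases List.mem_cons.mp hb with rfl | h
          · exact hg a ha
          · exact hfs a (hmem a (by simp [ha])) b h

theorem pv_A_pairwise (keyword : String) (xs : List String) :
    (sort_list_by_count_keyword keyword xs).Pairwise
      (fun a b => PySem.Str.count a keyword ≤ PySem.Str.count b keyword) := by
  have := pv_outer_sorts keyword (xs.length - 1) xs []
    (by omega) (by simp) (by simp)
  simpa [sort_list_by_count_keyword] using this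

-- ===== VERDICT (by name: the statement is the Claim_ definition above) =====
theorem sort_list_by_count_keyword_spec : Claim_equal_sort_list_by_count_keyword := by
  intro keyword input_list _
  show sort_list_by_count_keyword keyword input_list = sort_list_by_count_keyword_alt keyword input_list
  have h1 : PySem.List.sorted (sort_list_by_count_keyword keyword input_list)
      (fun s => PySem.Str.count s keyword) false =
      sort_list_by_count_keyword_alt keyword input_list := by
    unfold sort_list_by_count_keyword sort_list_by_count_keyword_alt
    exact pv_sorted_outer keyword (input_list.length - 1) input_list
  rw [← h1]
  exact (PySem.List.sorted_eq_self_of_pairwise _ _ (pv_A_pairwise keyword input_list)).symm
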